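-- pv_equiv track=rewrite | github.com/xiedidan/freqtrade-strategies | parallel_backtest/worker.py | _extract_error_from_output
-- ===== SOURCE A (Python) =====
-- from typing import List, Optional, Dict, Any, Callable
--
-- def _extract_error_from_output(output_lines: List[str]) -> str:
--     """
--     Extract error message from output lines.
--
--     Args:
--         output_lines: List of output lines
--
--     Returns:
--         Extracted error message
--     """
--     # Look for error lines
--     for line in reversed(output_lines):
--         line_lower = line.lower()
--         if 'error' in line_lower or 'exception' in line_lower:
--             return line.strip()
--
--     # Return last non-empty line
--     for line in reversed(output_lines):
--         if line.strip():
--             return line.strip()[:200]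
--
--     return "Backtest failed with no error message"
-- ===== SOURCE B (Python) =====
-- def _extract_error_from_output(output_lines):
--     last_nonempty = None
--     for line in reversed(output_lines):
--         if 'error' in line.lower() or 'exception' in line.lower():
--             return line.strip()
--         if last_nonempty is None:
--             s = line.strip()
--             if s:
--                 last_nonempty = s
--     if last_nonempty is not None:
--         return last_nonempty[:200]
--     return "Backtest failed with no error message"
-- ===== Notes on version B (the rewrite author's own statement) =====
-- stated objective: simpler
-- what changed: Fuses A's two reversed scans into a single pass that returns immediately on an error/exception line while recording the last non-empty stripped line once, truncating it only after the loop.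
import Mathlib
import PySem

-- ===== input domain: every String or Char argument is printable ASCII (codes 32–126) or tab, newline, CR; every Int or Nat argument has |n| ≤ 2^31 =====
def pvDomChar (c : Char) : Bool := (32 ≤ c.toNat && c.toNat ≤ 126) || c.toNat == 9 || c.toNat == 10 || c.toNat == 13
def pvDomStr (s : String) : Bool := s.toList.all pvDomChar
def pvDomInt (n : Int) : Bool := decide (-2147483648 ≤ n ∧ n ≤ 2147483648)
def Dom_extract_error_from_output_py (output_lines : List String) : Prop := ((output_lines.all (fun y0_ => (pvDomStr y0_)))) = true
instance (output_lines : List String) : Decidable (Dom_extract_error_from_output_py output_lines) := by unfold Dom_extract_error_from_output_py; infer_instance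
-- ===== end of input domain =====

-- B fuses A's two reversed scans into one pass (objective: simpler, same linear cost).

-- ===== PORT A =====
-- first loop: return line.strip() for the first error/exception line in reversed order
def pvErrLoop (ls : List String) : Option String :=
  match ls with
  | [] => none
  | l :: t =>
    let line_lower := PySem.Str.lower l
    if PySem.Str.isIn "error" line_lower || PySem.Str.isIn "exception" line_lower then
      some (PySem.Str.strip l)
    else pvErrLoop t

-- second loop: return line.strip()[:200] for the first non-empty line in reversed order
def pvNonEmptyLoop (ls : List String) : Option String :=
  match ls with
  | [] => none
  | l :: t =>
    if PySem.Str.strip l ≠ "" then some (PySem.Str.slice (PySem.Str.strip l) none (some 200))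
    else pvNonEmptyLoop t

def extract_error_from_output_py (output_lines : List String) : String :=
  match pvErrLoop output_lines.reverse with
  | some s => s
  | none =>
    match pvNonEmptyLoop output_lines.reverse with
    | some s => s
    | none => "Backtest failed with no error message"

-- ===== PORT B =====
-- single pass over the reversed list, recording the last non-empty stripped line once
def pvGoB (ls : List String) (last : Option String) : String :=
  match ls with
  | [] =>
    match last with
    | some v => PySem.Str.slice v none (some 200)
    | none => "Backtest failed with no error message"
  | l :: t =>
    if PySem.Str.isIn "error" (PySem.Str.lower l) || PySem.Str.isIn "exception" (PySem.Str.lower l) then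
      PySem.Str.strip l
    else
      match last with
      | some v => pvGoB t (some v)
      | none =>
        let s := PySem.Str.strip l
        if s ≠ "" then pvGoB t (some s) else pvGoB t none

def extract_error_from_output_py_alt (output_lines : List String) : String :=
  pvGoB output_lines.reverse none

-- ===== PRECONDITION & SPEC =====
def Spec_extract_error_from_output_py (output_lines : List String) (out : String) : Prop := out = extract_error_from_output_py_alt output_lines
instance (output_lines : List String) (out : String) : Decidable (Spec_extract_error_from_output_py output_lines out) := by unfold Spec_extract_error_from_output_py; infer_instance

-- ===== CLAIM (what is proved, stated in full; the proofs are below) =====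
def Claim_equal_extract_error_from_output_py : Prop := ∀ (output_lines : List String), Dom_extract_error_from_output_py output_lines → Spec_extract_error_from_output_py output_lines (extract_error_from_output_py output_lines)

-- ===== LEMMAS AND PROOFS =====

-- invariant of B's single pass once a non-empty line is recorded: only an error line can override it
theorem pvGoB_some (ls : List String) (v : String) :
    pvGoB ls (some v) =
      match pvErrLoop ls with
      | some s => s
      | none => PySem.Str.slice v none (some 200) := by
  induction ls with
  | nil => simp [pvGoB, pvErrLoop]
  | cons l t ih =>
    simp only [pvGoB, pvErrLoop]
    split_ifs with h1
    · rfl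
    · simp [ih]

-- B's single pass from the empty accumulator computes A's two-loop result
theorem pvGoB_none (ls : List String) :
    pvGoB ls none =
      match pvErrLoop ls with
      | some s => s
      | none =>
        match pvNonEmptyLoop ls with
        | some s => s
        | none => "Backtest failed with no error message" := by
  induction ls with
  | nil => simp [pvGoB, pvErrLoop, pvNonEmptyLoop]
  | cons l t ih =>
    by_cases h : (PySem.Str.isIn "error" (PySem.Str.lower l) || PySem.Str.isIn "exception" (PySem.Str.lower l)) = true
    all_goals simp at h
    · simp [pvGoB, pvErrLoop, h]
    · by_cases h2 : PySem.Str.strip l = ""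
      all_goals simp at h2
      · simp [pvGoB, pvErrLoop, pvNonEmptyLoop, h, h2, ih]
      · simp [pvGoB, pvErrLoop, pvNonEmptyLoop, h, h2, pvGoB_some]

-- ===== VERDICT (by name: the statement is the Claim_ definition above) =====
theorem extract_error_from_output_py_spec : Claim_equal_extract_error_from_output_py := by
  intro output_lines _
  unfold Spec_extract_error_from_output_py extract_error_from_output_py extract_error_from_output_py_alt
  rw [pvGoB_none]
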